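-- pv_equiv track=rewrite | github.com/yfliao/espnet | egs2/taigi2/asr1/tools/add_lid_tag.py | check_full_english
-- ===== SOURCE A (Python) =====
-- def check_english(check_str):
--     check = False
--     for ch in check_str:
--         if (ch >= u'\u0041' and ch <= u'\u005A') or \
--             (ch >= u'\u0061' and ch <= u'\u007A') or ch == "'":
--             check = True
--         else:
--             return False
--     if check:
--         return True
--
-- def check_full_english(check_str):
--     check = False
--     for w in check_str.split():
--         if check_english(w):
--             check = True
--         else:
--             return False
--     if check:
--         return True
-- ===== SOURCE B (Python) =====
-- def check_full_english(check_str):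
--     seen = False
--     for ch in check_str:
--         if ch.isspace():
--             continue
--         if ('A' <= ch <= 'Z') or ('a' <= ch <= 'z') or ch == "'":
--             seen = True
--         else:
--             return False
--     if seen:
--         return True
-- ===== Notes on version B (the rewrite author's own statement) =====
-- stated objective: simpler
-- what changed: Replaced split()-then-per-word-then-per-char nesting (and the check_english helper) with a single seen-flag scan over the characters that skips whitespace, returns False at the first disallowed character, and falls through to None when nothing non-space was seen.
import Mathlib
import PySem

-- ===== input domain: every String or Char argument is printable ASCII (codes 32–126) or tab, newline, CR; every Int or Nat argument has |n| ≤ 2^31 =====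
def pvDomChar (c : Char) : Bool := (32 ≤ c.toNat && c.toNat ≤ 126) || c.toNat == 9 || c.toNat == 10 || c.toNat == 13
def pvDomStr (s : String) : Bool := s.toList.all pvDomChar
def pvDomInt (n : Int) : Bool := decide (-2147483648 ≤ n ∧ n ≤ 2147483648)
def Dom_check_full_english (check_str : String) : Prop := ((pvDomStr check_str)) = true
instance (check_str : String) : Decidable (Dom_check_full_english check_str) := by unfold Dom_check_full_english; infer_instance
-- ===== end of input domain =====

-- B replaces split()-then-per-word-then-per-char with a single seen-flag scan over the characters (simpler, one pass, no helper).

-- ===== PORT A =====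
-- check_english: loop over the word's chars with the 'check' flag, early return False
def ceLoop : List Char → Bool → Option Bool
  | [], check =>
    if check then some true else none
  | ch :: rest, _ =>
    if (('A' ≤ ch && ch ≤ 'Z') || ('a' ≤ ch && ch ≤ 'z') || ch == '\'') then
      ceLoop rest true
    else
      some false

def check_english (check_str : String) : Option Bool :=
  ceLoop check_str.toList false

-- outer loop of check_full_english over the split words; 'if check_english(w)' is Python truthiness (only True is truthy)
def cfeLoop : List String → Bool → Option Bool
  | [], check =>
    if check then some true else none
  | w :: ws, _ =>
    match check_english w with
    | some true => cfeLoop ws true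
    | _ => some false

def check_full_english (check_str : String) : Option Bool :=
  cfeLoop (PySem.Str.split₀ check_str) false

-- ===== PORT B =====
def altLoop : List Char → Bool → Option Bool
  | [], seen => if seen then some true else none
  | ch :: rest, seen =>
    if PySem.Chars.isspace ch then altLoop rest seen
    else if (('A' ≤ ch && ch ≤ 'Z') || ('a' ≤ ch && ch ≤ 'z') || ch == '\'') then
      altLoop rest true
    else
      some false

def check_full_english_alt (check_str : String) : Option Bool :=
  altLoop check_str.toList false

-- ===== PRECONDITION & SPEC =====
def Spec_check_full_english (check_str : String) (out : Option Bool) : Prop := out = check_full_english_alt check_str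
instance (check_str : String) (out : Option Bool) : Decidable (Spec_check_full_english check_str out) := by unfold Spec_check_full_english; infer_instance

-- ===== CLAIM (what is proved, stated in full; the proofs are below) =====
def Claim_equal_check_full_english : Prop := ∀ (check_str : String), Dom_check_full_english check_str → Spec_check_full_english check_str (check_full_english check_str)

-- ===== LEMMAS AND PROOFS =====

-- the letter/apostrophe test written inline in both ports
def okCh (ch : Char) : Bool := ('A' ≤ ch && ch ≤ 'Z') || ('a' ≤ ch && ch ≤ 'z') || ch == '\''

lemma ceLoop_char (w : List Char) (check : Bool) :
    ceLoop w check =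
      if w.any (fun c => !okCh c) then some false
      else if check || !w.isEmpty then some true else none := by
  induction w generalizing check with
  | nil => simp [ceLoop]
  | cons c rest ih =>
    have hc : (('A' ≤ c && c ≤ 'Z') || ('a' ≤ c && c ≤ 'z') || c == '\'') = okCh c := rfl
    rw [ceLoop, hc]
    cases h : okCh c
    · simp [h]
    · simp [h, ih]

lemma altLoop_char (cs : List Char) (seen : Bool) :
    altLoop cs seen =
      if cs.any (fun c => !PySem.Chars.isspace c && !okCh c) then some false
      else if seen || cs.any (fun c => !PySem.Chars.isspace c) then some true else none := by
  induction cs generalizing seen with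
  | nil => simp [altLoop]
  | cons c rest ih =>
    have hc : (('A' ≤ c && c ≤ 'Z') || ('a' ≤ c && c ≤ 'z') || c == '\'') = okCh c := rfl
    rw [altLoop, hc]
    cases hs : PySem.Chars.isspace c
    · cases h : okCh c
      · simp [hs, h]
      · simp [hs, h, ih]
    · simp [hs, ih]

-- split₀.go state: acc = finished words (reversed), cur = current word (reversed), cs = rest
lemma go_any (p : Char → Bool) (cs : List Char) (cur : List Char) (acc : List (List Char)) :
    ((PySem.Chars.split₀.go cs cur acc).any (fun w => w.any p)) =
      (acc.any (fun w => w.any p) || cur.any p || cs.any (fun c => !PySem.Chars.isspace c && p c)) := by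
  induction cs generalizing cur acc with
  | nil =>
    cases hc : cur.isEmpty
    · simp [PySem.Chars.split₀.go, hc, Bool.or_comm]
    · simp_all [PySem.Chars.split₀.go, List.isEmpty_iff]
  | cons c rest ih =>
    cases hs : PySem.Chars.isspace c
    · simp [PySem.Chars.split₀.go, hs, ih, Bool.or_assoc, Bool.or_left_comm, Bool.or_comm]
    · cases hc : cur.isEmpty
      · simp [PySem.Chars.split₀.go, hs, hc, ih, Bool.or_left_comm, Bool.or_comm]
      · simp_all [PySem.Chars.split₀.go, List.isEmpty_iff]

lemma go_isEmpty (cs : List Char) (cur : List Char) (acc : List (List Char)) :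
    ((PySem.Chars.split₀.go cs cur acc).isEmpty) =
      (acc.isEmpty && cur.isEmpty && !cs.any (fun c => !PySem.Chars.isspace c)) := by
  induction cs generalizing cur acc with
  | nil =>
    cases hc : cur.isEmpty
    · simp [PySem.Chars.split₀.go, hc]
    · simp_all [PySem.Chars.split₀.go, List.isEmpty_iff]
  | cons c rest ih =>
    cases hs : PySem.Chars.isspace c
    · simp [PySem.Chars.split₀.go, hs, ih]
    · cases hc : cur.isEmpty
      · simp [PySem.Chars.split₀.go, hs, hc, ih]
      · simp_all [PySem.Chars.split₀.go, List.isEmpty_iff]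

lemma go_ne_nil (cs : List Char) (cur : List Char) (acc : List (List Char))
    (hacc : ∀ w ∈ acc, w ≠ []) :
    ∀ w ∈ PySem.Chars.split₀.go cs cur acc, w ≠ [] := by
  induction cs generalizing cur acc with
  | nil =>
    cases hc : cur.isEmpty
    · have hcur : cur ≠ [] := by simpa [List.isEmpty_iff] using hc
      simp only [PySem.Chars.split₀.go, hc, Bool.false_eq_true, if_false]
      intro w hw
      simp only [List.mem_reverse, List.mem_cons] at hw
      rcases hw with hw | hw
      · subst hw; simpa using hcur
      · exact hacc w hw
    · simp only [PySem.Chars.split₀.go, hc, if_true]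
      intro w hw
      exact hacc w (List.mem_reverse.mp hw)
  | cons c rest ih =>
    cases hs : PySem.Chars.isspace c
    · simp only [PySem.Chars.split₀.go, hs, Bool.false_eq_true, if_false]
      exact ih _ _ hacc
    · cases hc : cur.isEmpty
      · have hcur : cur ≠ [] := by simpa [List.isEmpty_iff] using hc
        simp only [PySem.Chars.split₀.go, hs, hc, if_true, Bool.false_eq_true, if_false]
        apply ih
        intro w hw
        rcases List.mem_cons.mp hw with hw | hw
        · subst hw; simpa using hcur
        · exact hacc w hw
      · simp only [PySem.Chars.split₀.go, hs, hc, if_true]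
        exact ih _ _ hacc

lemma cfeLoop_char (ws : List String) (check : Bool)
    (hne : ∀ w ∈ ws, w.toList ≠ []) :
    cfeLoop ws check =
      if ws.any (fun w => w.toList.any (fun c => !okCh c)) then some false
      else if check || !ws.isEmpty then some true else none := by
  induction ws generalizing check with
  | nil => simp [cfeLoop]
  | cons w ws ih =>
    have hw : w.toList ≠ [] := hne w (by simp)
    have hrest : ∀ v ∈ ws, v.toList ≠ [] := fun v hv => hne v (by simp [hv])
    by_cases hbad : w.toList.any (fun c => !okCh c) = true
    · have hce : check_english w = some false := by
        simp [check_english, ceLoop_char, hbad]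
      simp [cfeLoop, hce, hbad]
    · have hce : check_english w = some true := by
        simp [check_english, ceLoop_char, hbad, hw]
      simp [cfeLoop, hce, ih _ hrest, hbad]

theorem check_full_english_eq (s : String) :
    check_full_english s = check_full_english_alt s := by
  have hwords : ∀ w ∈ PySem.Str.split₀ s, w.toList ≠ [] := by
    intro w hw
    simp only [PySem.Str.split₀, PySem.Chars.split₀, List.mem_map] at hw
    obtain ⟨l, hl, rfl⟩ := hw
    have := go_ne_nil s.toList [] [] (by simp) l hl
    simpa using this
  have hmapA : ∀ p : Char → Bool,
      ((PySem.Str.split₀ s).any (fun w => w.toList.any p)) =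
        ((PySem.Chars.split₀.go s.toList [] []).any (fun w => w.any p)) := by
    intro p
    simp [PySem.Str.split₀, PySem.Chars.split₀, List.any_map, Function.comp_def,
      String.toList_ofList]
  have hmapE : ((PySem.Str.split₀ s).isEmpty) =
      ((PySem.Chars.split₀.go s.toList [] []).isEmpty) := by
    simp [PySem.Str.split₀, PySem.Chars.split₀]
  rw [check_full_english, check_full_english_alt,
    cfeLoop_char _ _ hwords, altLoop_char]
  rw [hmapA, hmapE, go_any, go_isEmpty]
  simp

-- ===== VERDICT (by name: the statement is the Claim_ definition above) =====
theorem check_full_english_spec : Claim_equal_check_full_english := by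
  intro s _
  unfold Spec_check_full_english
  exact check_full_english_eq s
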